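-- pv_equiv track=rewrite | github.com/robantef/SOP | Louvain/louvain_implementation.py | _renumber
-- ===== SOURCE A (Python) =====
-- from typing import Dict, Iterable, List, Set
--
-- def _renumber(node2com: Dict[object, int]) -> Dict[object, int]:
-- 	mapper: Dict[int, int] = {}
-- 	next_id = 0
-- 	out: Dict[object, int] = {}
-- 	for node, com in node2com.items():
-- 		if com not in mapper:
-- 			mapper[com] = next_id
-- 			next_id += 1
-- 		out[node] = mapper[com]
-- 	return out
-- ===== SOURCE B (Python) =====
-- def _renumber(node2com):
--     vals = list(node2com.values())
--     return {node: len(set(vals[:vals.index(com)])) for node, com in node2com.items()}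
-- ===== Notes on version B (the rewrite author's own statement) =====
-- stated objective: alternative
-- what changed: A maintains an incremental remap dict and a counter while writing the output; B keeps no table at all and computes each community's new id in closed form as the number of distinct communities occurring strictly before that community's first occurrence in the value sequence.
import Mathlib
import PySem

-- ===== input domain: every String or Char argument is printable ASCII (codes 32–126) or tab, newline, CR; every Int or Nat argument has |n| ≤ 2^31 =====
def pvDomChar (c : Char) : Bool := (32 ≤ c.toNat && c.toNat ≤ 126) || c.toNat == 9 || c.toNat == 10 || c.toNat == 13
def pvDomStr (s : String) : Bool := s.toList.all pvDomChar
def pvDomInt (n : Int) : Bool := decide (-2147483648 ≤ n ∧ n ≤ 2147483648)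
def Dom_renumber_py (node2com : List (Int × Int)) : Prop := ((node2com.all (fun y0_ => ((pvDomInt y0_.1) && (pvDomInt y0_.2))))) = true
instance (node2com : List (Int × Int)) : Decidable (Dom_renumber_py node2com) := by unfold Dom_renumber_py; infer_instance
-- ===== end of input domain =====

-- B keeps no remap table: each community's new id is computed in closed form as the number of
-- distinct communities occurring strictly before its first occurrence (objective: alternative).

-- ===== PORT A =====
-- one loop step of A: maybe extend the mapper, then write out[node] = mapper[com]
-- (mapper[com] cannot raise KeyError — com was just inserted if absent — so getD 0 is exact)
def renumberStepA (st : PySem.Dict Int Int × Int × PySem.Dict Int Int) (p : Int × Int) :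
    PySem.Dict Int Int × Int × PySem.Dict Int Int :=
  let m2 : PySem.Dict Int Int × Int :=
    if st.1.contains p.2 = false then (st.1.insert p.2 st.2.1, st.2.1 + 1)
    else (st.1, st.2.1)
  (m2.1, m2.2, st.2.2.insert p.1 (m2.1.getD p.2 0))

def renumber_py (node2com : List (Int × Int)) : List (Int × Int) :=
  (node2com.foldl renumberStepA (PySem.Dict.empty, 0, PySem.Dict.empty)).2.2.items

-- ===== PORT B =====
-- len(set(vals[:vals.index(com)])): vals.index(com) never raises (com ∈ vals), so getD 0 is
-- exact, and the nonnegative slice vals[:j] is vals.take j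
def rankVal (vals : List Int) (c : Int) : Int :=
  ((PySem.List.dedup (vals.take ((PySem.List.index? vals c).getD 0))).length : Int)

def renumberStepB (vals : List Int) (out : PySem.Dict Int Int) (p : Int × Int) :
    PySem.Dict Int Int :=
  out.insert p.1 (rankVal vals p.2)

def renumber_py_alt (node2com : List (Int × Int)) : List (Int × Int) :=
  let vals := node2com.map (·.2)
  (node2com.foldl (renumberStepB vals) PySem.Dict.empty).items

-- ===== PRECONDITION & SPEC =====
def Spec_renumber_py (node2com : List (Int × Int)) (out : List (Int × Int)) : Prop := out = renumber_py_alt node2com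
instance (node2com : List (Int × Int)) (out : List (Int × Int)) : Decidable (Spec_renumber_py node2com out) := by unfold Spec_renumber_py; infer_instance

-- ===== CLAIM (what is proved, stated in full; the proofs are below) =====
def Claim_equal_renumber_py : Prop := ∀ (node2com : List (Int × Int)), Dom_renumber_py node2com → Spec_renumber_py node2com (renumber_py node2com)

-- ===== LEMMAS AND PROOFS =====

-- B's closed-form rank of c equals the index of c in the deduplicated value list
lemma rank_index_eq (vals : List Int) (c : Int) (h : c ∈ vals) :
    PySem.List.index? (PySem.List.dedup vals) c =
    some (PySem.List.dedup (vals.take ((PySem.List.index? vals c).getD 0))).length := by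
  obtain ⟨k, hk⟩ := Option.isSome_iff_exists.mp ((PySem.List.index?_isSome_iff vals c).mpr h)
  obtain ⟨pre, suf, hdec, hlen, hpre⟩ := (PySem.List.index?_eq_some_iff vals c k).mp hk
  subst hdec
  have htake : (pre ++ c :: suf).take ((PySem.List.index? (pre ++ c :: suf) c).getD 0) = pre := by
    rw [hk, Option.getD_some, ← hlen, List.take_left]
  rw [htake]
  have hnd : c ∉ PySem.List.dedup pre := by
    rw [PySem.List.dedup_eq_ofList, PySem.Set.mem_ofList]; exact hpre
  have hded : PySem.List.dedup (pre ++ [c]) = PySem.List.dedup pre ++ [c] := by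
    simp only [PySem.List.dedup_eq_ofList]
    rw [PySem.Set.ofList_append_singleton, PySem.Set.add_of_not_mem (by
      rwa [← PySem.List.dedup_eq_ofList])]
  have htail : ∃ t, PySem.List.dedup (pre ++ c :: suf) =
      (PySem.List.dedup pre ++ [c]) ++ t := by
    have : pre ++ c :: suf = (pre ++ [c]) ++ suf := by simp
    rw [this]
    simp only [PySem.List.dedup_eq_ofList] at hded ⊢
    rw [PySem.Set.ofList_append, PySem.Set.update_eq_append_filter, hded]
    exact ⟨_, rfl⟩
  obtain ⟨t, ht⟩ := htail
  rw [ht]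
  exact (PySem.List.index?_eq_some_iff _ c _).mpr ⟨PySem.List.dedup pre, t, by simp, rfl, hnd⟩

lemma index?_append_of_mem {α : Type} [BEq α] [LawfulBEq α] (l t : List α) (c : α)
    (h : c ∈ l) : PySem.List.index? (l ++ t) c = PySem.List.index? l c := by
  obtain ⟨k, hk⟩ := Option.isSome_iff_exists.mp ((PySem.List.index?_isSome_iff l c).mpr h)
  obtain ⟨pre, suf, hdec, hlen, hpre⟩ := (PySem.List.index?_eq_some_iff l c k).mp hk
  rw [hk]
  exact (PySem.List.index?_eq_some_iff _ c k).mpr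
    ⟨pre, suf ++ t, by simp [hdec], hlen, hpre⟩

lemma index?_append_singleton_of_ne {α : Type} [BEq α] [LawfulBEq α] (l : List α) (c c' : α)
    (h : c' ≠ c) : PySem.List.index? (l ++ [c]) c' = PySem.List.index? l c' := by
  by_cases hm : c' ∈ l
  · exact index?_append_of_mem l [c] c' hm
  · rw [(PySem.List.index?_eq_none_iff _ c').mpr (by simp [hm, h]),
      (PySem.List.index?_eq_none_iff l c').mpr hm]

-- the main loop invariant: A's fold, started with a mapper that tabulates the index of each
-- already-seen community in the deduplicated seen-communities list, writes the same out-dict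
-- as B's fold over the remaining pairs ranked against the full value list.
lemma renumber_loop_eq (rest : List (Int × Int)) (seen : List Int)
    (mapper out : PySem.Dict Int Int)
    (hm : ∀ c, mapper.get? c =
      (PySem.List.index? (PySem.List.dedup seen) c).map (fun k => (k : Int))) :
    (rest.foldl renumberStepA (mapper, ((PySem.List.dedup seen).length : Int), out)).2.2 =
    rest.foldl (renumberStepB (seen ++ rest.map (·.2))) out := by
  induction rest generalizing seen mapper out with
  | nil => rfl
  | cons p rest ih =>
    simp only [List.foldl_cons]
    have hsplit : seen ++ (p :: rest).map (·.2) = (seen ++ [p.2]) ++ rest.map (·.2) := by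
      simp
    rw [hsplit]
    have hmemv : p.2 ∈ (seen ++ [p.2]) ++ rest.map (·.2) := by simp
    have hcontains : mapper.contains p.2 =
        (PySem.List.index? (PySem.List.dedup seen) p.2).isSome := by
      rw [PySem.Dict.contains_eq_isSome_get?, hm]
      cases PySem.List.index? (PySem.List.dedup seen) p.2 <;> rfl
    cases hidx : PySem.List.index? (PySem.List.dedup seen) p.2 with
    | none =>
      -- p.2 is a new community: A appends it to the mapper with id = |dedup seen|
      have hnotmem : p.2 ∉ PySem.List.dedup seen :=
        (PySem.List.index?_eq_none_iff _ p.2).mp hidx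
      have hded : PySem.List.dedup (seen ++ [p.2]) = PySem.List.dedup seen ++ [p.2] := by
        simp only [PySem.List.dedup_eq_ofList] at hnotmem ⊢
        rw [PySem.Set.ofList_append_singleton, PySem.Set.add_of_not_mem hnotmem]
      have hstep : renumberStepA (mapper, ((PySem.List.dedup seen).length : Int), out) p =
          (mapper.insert p.2 ((PySem.List.dedup seen).length : Int),
           ((PySem.List.dedup (seen ++ [p.2])).length : Int),
           out.insert p.1 ((PySem.List.dedup seen).length : Int)) := by
        simp only [renumberStepA, hcontains, hidx, Option.isSome_none, hded]
        rw [if_pos trivial]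
        rw [PySem.Dict.getD_eq_get?_getD, PySem.Dict.get?_insert]
        simp
      rw [hstep, ih (seen ++ [p.2]) _ _ ?_]
      · congr 1
        -- B writes the same value: index of p.2 in the full dedup list is |dedup seen|
        have hfull : PySem.List.index?
            (PySem.List.dedup ((seen ++ [p.2]) ++ rest.map (·.2))) p.2 =
            some (PySem.List.dedup seen).length := by
          have htail : ∃ t, PySem.List.dedup ((seen ++ [p.2]) ++ rest.map (·.2)) =
              (PySem.List.dedup seen ++ [p.2]) ++ t := by
            simp only [PySem.List.dedup_eq_ofList] at hded ⊢
            rw [PySem.Set.ofList_append, PySem.Set.update_eq_append_filter, hded]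
            exact ⟨_, rfl⟩
          obtain ⟨t, ht⟩ := htail
          rw [ht]
          exact (PySem.List.index?_eq_some_iff _ p.2 _).mpr
            ⟨PySem.List.dedup seen, t, by simp, rfl, hnotmem⟩
        have := rank_index_eq _ _ hmemv
        rw [hfull] at this
        simp only [renumberStepB, rankVal, ← Option.some_inj.mp this]
      · intro c
        rw [PySem.Dict.get?_insert, hded]
        by_cases hc : c = p.2
        · subst hc
          rw [if_pos rfl,
            (PySem.List.index?_eq_some_iff _ p.2 _).mpr
              ⟨PySem.List.dedup seen, [], rfl, rfl, hnotmem⟩]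
          rfl
        · rw [if_neg hc, index?_append_singleton_of_ne _ _ _ hc, hm]
    | some k =>
      -- p.2 was seen before: the mapper already holds its id k
      obtain ⟨pre, suf, hdec, hlen, hpre⟩ :=
        (PySem.List.index?_eq_some_iff _ p.2 k).mp hidx
      have hmem : p.2 ∈ PySem.List.dedup seen := by rw [hdec]; simp
      have hded : PySem.List.dedup (seen ++ [p.2]) = PySem.List.dedup seen := by
        simp only [PySem.List.dedup_eq_ofList] at hmem ⊢
        rw [PySem.Set.ofList_append_singleton, PySem.Set.add_of_mem hmem]
      have hstep : renumberStepA (mapper, ((PySem.List.dedup seen).length : Int), out) p =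
          (mapper, ((PySem.List.dedup (seen ++ [p.2])).length : Int),
           out.insert p.1 (k : Int)) := by
        simp only [renumberStepA, hcontains, hidx, Option.isSome_some, hded]
        rw [if_neg (by decide : ¬(true = false))]
        rw [PySem.Dict.getD_eq_get?_getD, hm p.2, hidx]
        rfl
      rw [hstep, ih (seen ++ [p.2]) _ _ (by rw [hded]; exact hm)]
      congr 1
      -- B writes the same value k: the closed-form rank of p.2 in the full list is k
      have hfull : PySem.List.index?
          (PySem.List.dedup ((seen ++ [p.2]) ++ rest.map (·.2))) p.2 = some k := by
        have htail : ∃ t, PySem.List.dedup ((seen ++ [p.2]) ++ rest.map (·.2)) =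
            PySem.List.dedup seen ++ t := by
          simp only [PySem.List.dedup_eq_ofList] at hded ⊢
          rw [PySem.Set.ofList_append, PySem.Set.update_eq_append_filter, hded]
          exact ⟨_, rfl⟩
        obtain ⟨t, ht⟩ := htail
        rw [ht, index?_append_of_mem _ _ _ hmem, hidx]
      have := rank_index_eq _ _ hmemv
      rw [hfull] at this
      simp only [renumberStepB, rankVal, ← Option.some_inj.mp this]

-- ===== VERDICT (by name: the statement is the Claim_ definition above) =====
theorem renumber_py_spec : Claim_equal_renumber_py := by
  intro node2com _
  unfold Spec_renumber_py renumber_py renumber_py_alt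
  have := renumber_loop_eq node2com [] PySem.Dict.empty PySem.Dict.empty
    (by intro c; simp [PySem.List.dedup, PySem.Dict.get?_empty, PySem.List.index?])
  simp only [List.nil_append] at this
  rw [show ((PySem.List.dedup ([] : List Int)).length : Int) = 0 from rfl] at this
  rw [this]
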